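-- pv_equiv track=rewrite | github.com/vallen300-bit/baker-master | kbl/lint_checks/contradiction_within_matter.py | _parse_conflicts
-- ===== SOURCE A (Python) =====
-- def _parse_conflicts(text: str) -> list[str]:
--     out: list[str] = []
--     for line in text.splitlines():
--         line = line.strip().lstrip("-* ").strip()
--         if not line:
--             continue
--         if line.upper().startswith("NO_CONFLICTS"):
--             return []
--         if line.upper().startswith("CONFLICT"):
--             out.append(line)
--     return out
-- ===== SOURCE B (Python) =====
-- def _parse_conflicts(text: str) -> list[str]:
--     cleaned = [s for s in
--                (line.strip().lstrip("-* ").strip() for line in text.splitlines())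
--                if s]
--     if any(l.upper().startswith("NO_CONFLICTS") for l in cleaned):
--         return []
--     return [l for l in cleaned if l.upper().startswith("CONFLICT")]
-- ===== Notes on version B (the rewrite author's own statement) =====
-- stated objective: simpler
-- what changed: Replaces the single order-sensitive accumulating loop with early return by three declarative passes: materialize the cleaned non-empty lines, one any() presence check for NO_CONFLICTS, then a comprehension filtering CONFLICT lines.
import Mathlib
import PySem

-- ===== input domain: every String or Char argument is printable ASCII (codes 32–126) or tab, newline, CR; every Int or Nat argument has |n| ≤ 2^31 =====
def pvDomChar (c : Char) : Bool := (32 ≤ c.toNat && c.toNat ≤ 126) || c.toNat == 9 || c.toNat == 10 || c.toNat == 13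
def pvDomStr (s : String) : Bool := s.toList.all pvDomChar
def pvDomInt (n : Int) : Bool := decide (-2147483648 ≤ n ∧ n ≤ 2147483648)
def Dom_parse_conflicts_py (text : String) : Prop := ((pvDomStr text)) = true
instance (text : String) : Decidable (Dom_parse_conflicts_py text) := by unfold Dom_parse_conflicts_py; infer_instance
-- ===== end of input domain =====

-- B replaces A's order-sensitive accumulating loop with an early return by three
-- declarative passes (clean+keep non-empty, any NO_CONFLICTS, filter CONFLICT); objective: simpler.

-- shared line cleaning: line.strip().lstrip("-* ").strip()
-- lstrip("-* ") has no PySem primitive; ported exactly as dropWhile over the char set {'-','*',' '}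
def pvCleanLine (l : String) : String :=
  PySem.Str.strip (String.ofList (((PySem.Str.strip l).toList).dropWhile
    (fun c => c == '-' || c == '*' || c == ' ')))

def pvNoc (l : String) : Bool := PySem.Str.startswith (PySem.Str.upper l) "NO_CONFLICTS"
def pvConf (l : String) : Bool := PySem.Str.startswith (PySem.Str.upper l) "CONFLICT"

-- ===== PORT A =====
def pvLoopA : List String → List String → List String
  | [], out => out
  | raw :: rest, out =>
    let line := pvCleanLine raw
    if line = "" then pvLoopA rest out
    else if pvNoc line then []
    else if pvConf line then pvLoopA rest (out ++ [line])
    else pvLoopA rest out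

def parse_conflicts_py (text : String) : List String :=
  pvLoopA (PySem.Str.splitlines text) []

-- ===== PORT B =====
def parse_conflicts_py_alt (text : String) : List String :=
  let cleaned := ((PySem.Str.splitlines text).map pvCleanLine).filter (fun s => s ≠ "")
  if cleaned.any pvNoc then []
  else cleaned.filter pvConf

-- ===== PRECONDITION & SPEC =====
def Spec_parse_conflicts_py (text : String) (out : List String) : Prop := out = parse_conflicts_py_alt text
instance (text : String) (out : List String) : Decidable (Spec_parse_conflicts_py text out) := by unfold Spec_parse_conflicts_py; infer_instance

-- ===== CLAIM (what is proved, stated in full; the proofs are below) =====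
def Claim_equal_parse_conflicts_py : Prop := ∀ (text : String), Dom_parse_conflicts_py text → Spec_parse_conflicts_py text (parse_conflicts_py text)

-- ===== LEMMAS AND PROOFS =====
theorem pvLoopA_eq (lines : List String) (out : List String) :
    pvLoopA lines out =
      (let cleaned := (lines.map pvCleanLine).filter (fun s => s ≠ "")
       if cleaned.any pvNoc then [] else out ++ cleaned.filter pvConf) := by
  induction lines generalizing out with
  | nil => simp [pvLoopA]
  | cons raw rest ih =>
    simp only [pvLoopA, List.map_cons]
    by_cases h0 : pvCleanLine raw = ""
    · simp [h0, ih]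
    · by_cases h1 : pvNoc (pvCleanLine raw)
      · simp [h0, h1]
      · by_cases h2 : pvConf (pvCleanLine raw)
        · simp [h0, h1, h2, ih]
        · simp [h0, h1, h2, ih]

-- ===== VERDICT (by name: the statement is the Claim_ definition above) =====
theorem parse_conflicts_py_spec : Claim_equal_parse_conflicts_py := by
  intro text _
  unfold Spec_parse_conflicts_py parse_conflicts_py parse_conflicts_py_alt
  simp [pvLoopA_eq]
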